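-- pv_equiv track=rewrite | github.com/daniel-reich/ubiquitous-fiesta | 8NyNftbNXd6CZCDXf_18.py | get_coin_balances
-- ===== SOURCE A (Python) =====
-- def get_coin_balances(lst1, lst2):
--   p1,p2 = 3,3
--   for c1,c2 in zip(lst1,lst2):
--     if c1=='share':
--       p1-=1
--       p2+=3
--     if c2=='share':
--       p2-=1
--       p1+=3
--   return [p1,p2]
-- ===== SOURCE B (Python) =====
-- def get_coin_balances(lst1, lst2):
--   n = min(len(lst1), len(lst2))
--   s1 = lst1[:n].count('share')
--   s2 = lst2[:n].count('share')
--   return [3 - s1 + 3*s2, 3 + 3*s1 - s2]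
-- ===== Notes on version B (the rewrite author's own statement) =====
-- stated objective: simpler
-- what changed: Replaces the element-by-element accumulating loop over zip(lst1,lst2) with aggregate counting of 'share' in each list truncated to the shorter length, then a closed-form arithmetic expression for the two balances.
import Mathlib
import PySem

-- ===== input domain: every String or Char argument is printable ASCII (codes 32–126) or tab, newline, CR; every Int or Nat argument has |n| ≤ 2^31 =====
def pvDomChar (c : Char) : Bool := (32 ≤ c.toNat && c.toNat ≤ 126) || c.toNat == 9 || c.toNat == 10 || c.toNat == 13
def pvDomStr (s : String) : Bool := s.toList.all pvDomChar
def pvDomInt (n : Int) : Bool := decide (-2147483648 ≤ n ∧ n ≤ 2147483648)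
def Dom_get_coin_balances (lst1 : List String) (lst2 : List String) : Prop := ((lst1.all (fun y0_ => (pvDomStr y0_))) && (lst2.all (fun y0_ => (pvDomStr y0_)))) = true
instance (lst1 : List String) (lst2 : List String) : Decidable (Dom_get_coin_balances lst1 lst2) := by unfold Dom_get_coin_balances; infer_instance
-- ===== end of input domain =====

-- B replaces the accumulating loop over zip with counts of 'share' on the truncated lists plus a closed-form expression (objective: simpler).


-- ===== PORT A =====
-- literal transliteration: fold over zip lst1 lst2, updating (p1,p2) with the two independent ifs
def get_coin_balances (lst1 : List String) (lst2 : List String) : List Int :=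
  let st := (lst1.zip lst2).foldl (fun (p : Int × Int) (c : String × String) =>
    let p := if c.1 = "share" then (p.1 - 1, p.2 + 3) else p
    let p := if c.2 = "share" then (p.1 + 3, p.2 - 1) else p
    p) (3, 3)
  [st.1, st.2]

-- ===== PORT B =====
def get_coin_balances_alt (lst1 : List String) (lst2 : List String) : List Int :=
  let n := min lst1.length lst2.length
  let s1 : Int := ((lst1.take n).count "share" : Nat)
  let s2 : Int := ((lst2.take n).count "share" : Nat)
  [3 - s1 + 3 * s2, 3 + 3 * s1 - s2]

-- ===== PRECONDITION & SPEC =====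
def Spec_get_coin_balances (lst1 : List String) (lst2 : List String) (out : List Int) : Prop := out = get_coin_balances_alt lst1 lst2
instance (lst1 : List String) (lst2 : List String) (out : List Int) : Decidable (Spec_get_coin_balances lst1 lst2 out) := by unfold Spec_get_coin_balances; infer_instance

-- ===== CLAIM (what is proved, stated in full; the proofs are below) =====
def Claim_equal_get_coin_balances : Prop := ∀ (lst1 : List String) (lst2 : List String), Dom_get_coin_balances lst1 lst2 → Spec_get_coin_balances lst1 lst2 (get_coin_balances lst1 lst2)

-- ===== LEMMAS AND PROOFS =====

-- invariant: the fold's state from any start (a,b) is (a - s1 + 3*s2, b + 3*s1 - s2),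
-- where s1/s2 count 'share' in the components of the zipped pairs
lemma gcb_fold (ps : List (String × String)) (a b : Int) :
    ps.foldl (fun (p : Int × Int) (c : String × String) =>
      let p := if c.1 = "share" then (p.1 - 1, p.2 + 3) else p
      let p := if c.2 = "share" then (p.1 + 3, p.2 - 1) else p
      p) (a, b)
    = (a - ((ps.map Prod.fst).count "share" : Nat) + 3 * ((ps.map Prod.snd).count "share" : Nat),
       b + 3 * ((ps.map Prod.fst).count "share" : Nat) - ((ps.map Prod.snd).count "share" : Nat)) := by
  induction ps generalizing a b with
  | nil => simp
  | cons hd tl ih =>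
    simp only [List.foldl_cons, List.map_cons, List.count_cons]
    by_cases h1 : hd.1 = "share" <;> by_cases h2 : hd.2 = "share" <;>
      simp [h1, h2, ih, Prod.ext_iff] <;> constructor <;> ring

lemma zip_map_fst (l1 l2 : List String) :
    (l1.zip l2).map Prod.fst = l1.take (min l1.length l2.length) := by
  induction l1 generalizing l2 with
  | nil => simp
  | cons h t ih => cases l2 with
    | nil => simp
    | cons h2 t2 => simp [ih, Nat.succ_min_succ]

lemma zip_map_snd (l1 l2 : List String) :
    (l1.zip l2).map Prod.snd = l2.take (min l1.length l2.length) := by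
  induction l1 generalizing l2 with
  | nil => simp
  | cons h t ih => cases l2 with
    | nil => simp
    | cons h2 t2 => simp [ih, Nat.succ_min_succ]

-- ===== VERDICT (by name: the statement is the Claim_ definition above) =====
theorem get_coin_balances_spec : Claim_equal_get_coin_balances := by
  intro lst1 lst2 _
  unfold Spec_get_coin_balances get_coin_balances get_coin_balances_alt
  simp only [gcb_fold, zip_map_fst, zip_map_snd]
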